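-- pv_equiv track=rewrite | github.com/learnwithjuni/USACO-Bronze- | UB36-Load-Balancing/main.py | calcMaxCowsInRegion
-- ===== SOURCE A (Python) =====
-- def calcMaxCowsInRegion(a,b, coordinates):
--     # numCows[0] stores number of cows where x>a and y>b, etc.
--     numCows = [0, 0, 0, 0]
--
--     for coord in coordinates:
--         x = coord[0]
--         y = coord[1]
--
--         if x > a and y > b:
--             numCows[0] += 1
--         elif x > a and y < b:
--             numCows[1] += 1
--         elif x < a and y > b:
--             numCows[2] += 1
--         else:
--             numCows[3] += 1
--
--     return max(numCows)
-- ===== SOURCE B (Python) =====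
-- def calcMaxCowsInRegion(a, b, coordinates):
--     pts = list(coordinates)
--     q0 = sum(1 for (x, y) in pts if x > a and y > b)
--     q1 = sum(1 for (x, y) in pts if x > a and y < b)
--     q2 = sum(1 for (x, y) in pts if x < a and y > b)
--     q3 = len(pts) - q0 - q1 - q2
--     return max(q0, q1, q2, q3)
-- ===== Notes on version B (the rewrite author's own statement) =====
-- stated objective: simpler
-- what changed: Replaces the single loop with branch-ordered in-place counter updates by three independent comprehension counts, deriving the catch-all bucket by subtraction from the total length.
import Mathlib
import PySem

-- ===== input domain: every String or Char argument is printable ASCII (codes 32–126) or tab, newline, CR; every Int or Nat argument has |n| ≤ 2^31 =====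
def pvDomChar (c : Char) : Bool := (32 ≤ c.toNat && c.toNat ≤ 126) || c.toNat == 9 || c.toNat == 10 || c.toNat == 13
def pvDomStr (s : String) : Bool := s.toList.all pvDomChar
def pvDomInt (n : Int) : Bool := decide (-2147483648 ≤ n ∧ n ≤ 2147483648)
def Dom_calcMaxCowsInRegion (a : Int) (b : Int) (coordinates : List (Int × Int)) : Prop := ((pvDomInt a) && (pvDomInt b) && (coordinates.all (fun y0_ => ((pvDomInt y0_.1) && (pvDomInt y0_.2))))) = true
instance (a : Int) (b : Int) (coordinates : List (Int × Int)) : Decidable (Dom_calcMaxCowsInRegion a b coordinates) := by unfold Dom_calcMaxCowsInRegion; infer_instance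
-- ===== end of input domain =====

-- B replaces A's single branch-ordered counting loop by three independent
-- comprehension counts plus a length subtraction for the catch-all bucket (objective: simpler).

-- ===== PORT A =====
-- A keeps a 4-cell counter list updated in one loop; ported as a foldl over a 4-tuple.
def calcMaxCowsInRegion (a : Int) (b : Int) (coordinates : List (Int × Int)) : Int :=
  let numCows : Int × Int × Int × Int :=
    coordinates.foldl (fun n coord =>
      let x := coord.1
      let y := coord.2
      if x > a ∧ y > b then (n.1 + 1, n.2.1, n.2.2.1, n.2.2.2)
      else if x > a ∧ y < b then (n.1, n.2.1 + 1, n.2.2.1, n.2.2.2)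
      else if x < a ∧ y > b then (n.1, n.2.1, n.2.2.1 + 1, n.2.2.2)
      else (n.1, n.2.1, n.2.2.1, n.2.2.2 + 1)) (0, 0, 0, 0)
  max (max (max numCows.1 numCows.2.1) numCows.2.2.1) numCows.2.2.2

-- ===== PORT B =====
-- three independent counts (sum of a 0/1 comprehension = countP), catch-all by subtraction
def calcMaxCowsInRegion_alt (a : Int) (b : Int) (coordinates : List (Int × Int)) : Int :=
  let q0 : Int := coordinates.countP (fun c => decide (c.1 > a ∧ c.2 > b))
  let q1 : Int := coordinates.countP (fun c => decide (c.1 > a ∧ c.2 < b))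
  let q2 : Int := coordinates.countP (fun c => decide (c.1 < a ∧ c.2 > b))
  let q3 : Int := (coordinates.length : Int) - q0 - q1 - q2
  max (max (max q0 q1) q2) q3

-- ===== PRECONDITION & SPEC =====
def Spec_calcMaxCowsInRegion (a : Int) (b : Int) (coordinates : List (Int × Int)) (out : Int) : Prop := out = calcMaxCowsInRegion_alt a b coordinates
instance (a : Int) (b : Int) (coordinates : List (Int × Int)) (out : Int) : Decidable (Spec_calcMaxCowsInRegion a b coordinates out) := by unfold Spec_calcMaxCowsInRegion; infer_instance

-- ===== CLAIM (what is proved, stated in full; the proofs are below) =====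
def Claim_equal_calcMaxCowsInRegion : Prop := ∀ (a : Int) (b : Int) (coordinates : List (Int × Int)), Dom_calcMaxCowsInRegion a b coordinates → Spec_calcMaxCowsInRegion a b coordinates (calcMaxCowsInRegion a b coordinates)

-- ===== LEMMAS AND PROOFS =====

-- A's fold, started from any state, adds the three quadrant counts and the
-- complementary count componentwise.
theorem pvFoldChar (a b : Int) (coordinates : List (Int × Int)) :
    ∀ s : Int × Int × Int × Int,
      coordinates.foldl (fun n (coord : Int × Int) =>
        let x := coord.1
        let y := coord.2
        if x > a ∧ y > b then (n.1 + 1, n.2.1, n.2.2.1, n.2.2.2)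
        else if x > a ∧ y < b then (n.1, n.2.1 + 1, n.2.2.1, n.2.2.2)
        else if x < a ∧ y > b then (n.1, n.2.1, n.2.2.1 + 1, n.2.2.2)
        else (n.1, n.2.1, n.2.2.1, n.2.2.2 + 1)) s
      = (s.1 + coordinates.countP (fun c => decide (c.1 > a ∧ c.2 > b)),
         s.2.1 + coordinates.countP (fun c => decide (c.1 > a ∧ c.2 < b)),
         s.2.2.1 + coordinates.countP (fun c => decide (c.1 < a ∧ c.2 > b)),
         s.2.2.2 + coordinates.countP (fun c =>
           decide (¬(c.1 > a ∧ c.2 > b) ∧ ¬(c.1 > a ∧ c.2 < b) ∧ ¬(c.1 < a ∧ c.2 > b)))) := by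
  induction coordinates with
  | nil => intro s; simp
  | cons hd tl ih =>
    intro s
    simp only [List.foldl_cons, List.countP_cons]
    rw [ih]
    by_cases h0 : hd.1 > a ∧ hd.2 > b
    · rw [if_pos h0, decide_eq_true h0,
         decide_eq_false (show ¬(hd.1 > a ∧ hd.2 < b) by omega),
         decide_eq_false (show ¬(hd.1 < a ∧ hd.2 > b) by omega),
         decide_eq_false (show ¬(¬(hd.1 > a ∧ hd.2 > b) ∧ ¬(hd.1 > a ∧ hd.2 < b) ∧ ¬(hd.1 < a ∧ hd.2 > b)) from fun h => h.1 h0)]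
      simp only [Prod.mk.injEq, reduceIte]
      push_cast
      omega
    · rw [if_neg h0, decide_eq_false h0]
      by_cases h1 : hd.1 > a ∧ hd.2 < b
      · rw [if_pos h1, decide_eq_true h1,
           decide_eq_false (show ¬(hd.1 < a ∧ hd.2 > b) by omega),
           decide_eq_false (show ¬(¬(hd.1 > a ∧ hd.2 > b) ∧ ¬(hd.1 > a ∧ hd.2 < b) ∧ ¬(hd.1 < a ∧ hd.2 > b)) from fun h => h.2.1 h1)]
        simp only [Prod.mk.injEq, reduceIte]
        push_cast
        omega
      · rw [if_neg h1, decide_eq_false h1]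
        by_cases h2 : hd.1 < a ∧ hd.2 > b
        · rw [if_pos h2, decide_eq_true h2,
             decide_eq_false (show ¬(¬(hd.1 > a ∧ hd.2 > b) ∧ ¬(hd.1 > a ∧ hd.2 < b) ∧ ¬(hd.1 < a ∧ hd.2 > b)) from fun h => h.2.2 h2)]
          simp only [Prod.mk.injEq, reduceIte]
          push_cast
          omega
        · rw [if_neg h2, decide_eq_false h2,
             decide_eq_true (show ¬(hd.1 > a ∧ hd.2 > b) ∧ ¬(hd.1 > a ∧ hd.2 < b) ∧ ¬(hd.1 < a ∧ hd.2 > b) from ⟨h0, h1, h2⟩)]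
          simp only [Prod.mk.injEq, reduceIte]
          push_cast
          omega

-- The three quadrant predicates are pairwise exclusive, so the complementary count
-- is length minus the three counts.
theorem pvCountCompl (a b : Int) (coordinates : List (Int × Int)) :
    (coordinates.countP (fun c =>
        decide (¬(c.1 > a ∧ c.2 > b) ∧ ¬(c.1 > a ∧ c.2 < b) ∧ ¬(c.1 < a ∧ c.2 > b))) : Int)
    = (coordinates.length : Int)
      - coordinates.countP (fun c => decide (c.1 > a ∧ c.2 > b))
      - coordinates.countP (fun c => decide (c.1 > a ∧ c.2 < b))
      - coordinates.countP (fun c => decide (c.1 < a ∧ c.2 > b)) := by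
  induction coordinates with
  | nil => simp
  | cons hd tl ih =>
    simp only [List.countP_cons, List.length_cons]
    by_cases h0 : hd.1 > a ∧ hd.2 > b
    · rw [decide_eq_true h0,
         decide_eq_false (show ¬(hd.1 > a ∧ hd.2 < b) by omega),
         decide_eq_false (show ¬(hd.1 < a ∧ hd.2 > b) by omega),
         decide_eq_false (show ¬(¬(hd.1 > a ∧ hd.2 > b) ∧ ¬(hd.1 > a ∧ hd.2 < b) ∧ ¬(hd.1 < a ∧ hd.2 > b)) from fun h => h.1 h0)]
      simp only [reduceIte]
      push_cast
      omega
    · rw [decide_eq_false h0]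
      by_cases h1 : hd.1 > a ∧ hd.2 < b
      · rw [decide_eq_true h1,
           decide_eq_false (show ¬(hd.1 < a ∧ hd.2 > b) by omega),
           decide_eq_false (show ¬(¬(hd.1 > a ∧ hd.2 > b) ∧ ¬(hd.1 > a ∧ hd.2 < b) ∧ ¬(hd.1 < a ∧ hd.2 > b)) from fun h => h.2.1 h1)]
        simp only [reduceIte]
        push_cast
        omega
      · rw [decide_eq_false h1]
        by_cases h2 : hd.1 < a ∧ hd.2 > b
        · rw [decide_eq_true h2,
             decide_eq_false (show ¬(¬(hd.1 > a ∧ hd.2 > b) ∧ ¬(hd.1 > a ∧ hd.2 < b) ∧ ¬(hd.1 < a ∧ hd.2 > b)) from fun h => h.2.2 h2)]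
          simp only [reduceIte]
          push_cast
          omega
        · rw [decide_eq_false h2,
             decide_eq_true (show ¬(hd.1 > a ∧ hd.2 > b) ∧ ¬(hd.1 > a ∧ hd.2 < b) ∧ ¬(hd.1 < a ∧ hd.2 > b) from ⟨h0, h1, h2⟩)]
          simp only [reduceIte]
          push_cast
          omega

-- ===== VERDICT (by name: the statement is the Claim_ definition above) =====
theorem calcMaxCowsInRegion_spec : Claim_equal_calcMaxCowsInRegion := by
  intro a b coordinates _
  unfold Spec_calcMaxCowsInRegion calcMaxCowsInRegion calcMaxCowsInRegion_alt
  simp only [pvFoldChar a b coordinates (0, 0, 0, 0), pvCountCompl a b coordinates, zero_add]
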